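-- pv_equiv track=rewrite | github.com/BANGBANGROX/Python-Coding | CodingProblems/Triples_with_Bitwise_AND_Equal_To_Zero.py | countTriplets
-- ===== SOURCE A (Python) =====
-- from typing import List
--
-- def countTriplets(nums: List[int]) -> int:
--     dp = {}
--     n = len(nums)
--     ans = 0
--
--     for i in range(n):
--         for j in range(n):
--             if dp.get(nums[i] & nums[j]) == None:
--                 dp[nums[i] & nums[j]] = 0
--             dp[nums[i] & nums[j]] += 1
--
--     for i in range(0, n):
--         for j in dp:
--             if (nums[i] & j) == 0:
--                 ans += dp[j]
--
--     return ans
-- ===== SOURCE B (Python) =====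
-- from typing import List
--
-- def countTriplets(nums: List[int]) -> int:
--     # Stream over ordered pairs once; for each pair-AND mask, lazily memoize
--     # how many elements annihilate it (z & mask == 0), and accumulate that.
--     zeros = {}
--     ans = 0
--     for x in nums:
--         for y in nums:
--             m = x & y
--             if m not in zeros:
--                 c = 0
--                 for z in nums:
--                     if z & m == 0:
--                         c += 1
--                 zeros[m] = c
--             ans += zeros[m]
--     return ans
-- ===== Notes on version B (the rewrite author's own statement) =====
-- stated objective: alternative
-- what changed: B drops A's pair-AND frequency table and its second table-scanning pass entirely: it streams over ordered pairs once and, per distinct pair-AND mask, lazily memoizes the count of elements that annihilate the mask (z & m == 0), accumulating those counts on the fly - the dual tabulation (annihilator counts per mask instead of mask frequencies matched per element).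
import Mathlib
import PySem

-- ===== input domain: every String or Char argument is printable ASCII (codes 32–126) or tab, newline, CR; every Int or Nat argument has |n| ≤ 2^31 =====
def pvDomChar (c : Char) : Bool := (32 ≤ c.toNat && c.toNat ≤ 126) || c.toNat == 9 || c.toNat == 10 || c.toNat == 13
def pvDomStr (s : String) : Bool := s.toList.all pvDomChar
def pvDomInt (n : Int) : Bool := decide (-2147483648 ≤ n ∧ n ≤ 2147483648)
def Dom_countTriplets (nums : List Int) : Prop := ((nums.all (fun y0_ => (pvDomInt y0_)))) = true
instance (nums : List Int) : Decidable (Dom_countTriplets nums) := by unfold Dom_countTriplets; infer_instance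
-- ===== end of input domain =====

-- B drops A's pair-AND frequency table and its second table-scanning pass: it streams over the
-- ordered pairs once and lazily memoizes, per distinct pair-AND mask, the count of elements that
-- annihilate that mask; same return value on every input ('alternative').

-- ===== PORT A =====
def countTriplets (nums : List Int) : Int :=
  let n : Int := nums.length
  let dp : PySem.Dict Int Int :=
    (PySem.List.pyRange 0 n 1).foldl (fun dp i =>
      (PySem.List.pyRange 0 n 1).foldl (fun dp j =>
        let k := PySem.Int.band (PySem.List.pyGetD nums i 0) (PySem.List.pyGetD nums j 0)
        (if dp.get? k = none then dp.insert k 0 else dp).insert k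
          ((if dp.get? k = none then dp.insert k 0 else dp).getD k 0 + 1)) dp) PySem.Dict.empty
  (PySem.List.pyRange 0 n 1).foldl (fun ans i =>
    dp.keys.foldl (fun ans j =>
      if PySem.Int.band (PySem.List.pyGetD nums i 0) j = 0 then ans + dp.getD j 0 else ans) ans) 0

-- ===== PORT B =====

-- B's innermost loop: the number of elements z of nums with z & m == 0
def pvZcount (nums : List Int) (m : Int) : Int :=
  nums.foldl (fun c z => if PySem.Int.band z m = 0 then c + 1 else c) 0

def countTriplets_alt (nums : List Int) : Int :=
  (nums.foldl (fun (st : PySem.Dict Int Int × Int) x =>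
    nums.foldl (fun st y =>
      let m := PySem.Int.band x y
      let zeros := if st.1.get? m = none then st.1.insert m (pvZcount nums m) else st.1
      (zeros, st.2 + zeros.getD m 0)) st) (PySem.Dict.empty, 0)).2

-- ===== PRECONDITION & SPEC =====
def Spec_countTriplets (nums : List Int) (out : Int) : Prop := out = countTriplets_alt nums
instance (nums : List Int) (out : Int) : Decidable (Spec_countTriplets nums out) := by unfold Spec_countTriplets; infer_instance

-- ===== CLAIM (what is proved, stated in full; the proofs are below) =====
def Claim_equal_countTriplets : Prop := ∀ (nums : List Int), Dom_countTriplets nums → Spec_countTriplets nums (countTriplets nums)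

-- ===== LEMMAS AND PROOFS =====

-- the multiset of pairwise ANDs of A's first double loop
def pvPairs (nums : List Int) : List Int :=
  nums.flatMap (fun a => nums.map (fun b => PySem.Int.band a b))

-- the common canonical value: the number of index triples (i, a, b) with nums[i] & nums[a] & nums[b] == 0
def pvV (nums : List Int) : Int :=
  (nums.map (fun x =>
    ((pvPairs nums).map (fun k => if PySem.Int.band x k = 0 then (1 : Int) else 0)).sum)).sum

-- A's conditional-insert body is a plain counting insert
theorem pvStepEq (dp : PySem.Dict Int Int) (k : Int) :
    (if dp.get? k = none then dp.insert k 0 else dp).insert k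
      ((if dp.get? k = none then dp.insert k 0 else dp).getD k 0 + 1)
    = dp.insert k (dp.getD k 0 + 1) := by
  cases h : dp.get? k with
  | none => simp [PySem.Dict.getD_insert_self, PySem.Dict.insert_insert_self,
      PySem.Dict.getD_of_get?_eq_none dp 0 h]
  | some v => simp

-- an if-accumulate loop is the starting value plus a 0/ite sum
theorem pvFoldlIteAdd {α : Type} (l : List α) (c : α → Prop) [DecidablePred c]
    (f : α → Int) (init : Int) :
    l.foldl (fun a x => if c x then a + f x else a) init
    = init + (l.map (fun x => if c x then f x else 0)).sum := by
  have h : (fun (a : Int) (x : α) => if c x then a + f x else a)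
      = fun a x => a + (if c x then f x else 0) := by
    funext a x; split <;> simp
  rw [h, PySem.List.foldl_add]

-- a nested range(n) × range(n) fold over xs[i], xs[j] is the nested fold over the elements
theorem pvNestedRange {γ : Type} (nums : List Int) (g : γ → Int → Int → γ) (init : γ) :
    (PySem.List.pyRange 0 (nums.length : Int) 1).foldl (fun acc i =>
      (PySem.List.pyRange 0 (nums.length : Int) 1).foldl (fun acc2 j =>
        g acc2 (PySem.List.pyGetD nums i 0) (PySem.List.pyGetD nums j 0)) acc) init
    = nums.foldl (fun acc x => nums.foldl (fun acc2 y => g acc2 x y) acc) init := by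
  have h0 : (PySem.List.pyRange 0 (nums.length : Int) 1).foldl (fun acc i =>
      (PySem.List.pyRange 0 (nums.length : Int) 1).foldl (fun acc2 j =>
        g acc2 (PySem.List.pyGetD nums i 0) (PySem.List.pyGetD nums j 0)) acc) init
      = nums.foldl (fun acc x =>
        (PySem.List.pyRange 0 (nums.length : Int) 1).foldl (fun acc2 j =>
          g acc2 x (PySem.List.pyGetD nums j 0)) acc) init :=
    PySem.List.foldl_pyRange_zero_pyGetD nums 0 (fun acc x =>
      (PySem.List.pyRange 0 (nums.length : Int) 1).foldl (fun acc2 j =>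
        g acc2 x (PySem.List.pyGetD nums j 0)) acc) init
  have h1 : (fun (acc : γ) (x : Int) =>
      (PySem.List.pyRange 0 (nums.length : Int) 1).foldl (fun acc2 j =>
        g acc2 x (PySem.List.pyGetD nums j 0)) acc)
      = fun acc x => nums.foldl (fun acc2 y => g acc2 x y) acc := by
    funext acc x
    exact PySem.List.foldl_pyRange_zero_pyGetD nums 0 (fun acc2 y => g acc2 x y) acc
  rw [h0, h1]

-- A's dp dictionary, as the port builds it
def pvDpA (nums : List Int) : PySem.Dict Int Int :=
  (PySem.List.pyRange 0 (nums.length : Int) 1).foldl (fun dp i =>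
    (PySem.List.pyRange 0 (nums.length : Int) 1).foldl (fun dp j =>
      let k := PySem.Int.band (PySem.List.pyGetD nums i 0) (PySem.List.pyGetD nums j 0)
      (if dp.get? k = none then dp.insert k 0 else dp).insert k
        ((if dp.get? k = none then dp.insert k 0 else dp).getD k 0 + 1)) dp) PySem.Dict.empty

theorem pvDpA_eq (nums : List Int) :
    pvDpA nums = PySem.Dict.counter (pvPairs nums) := by
  have hdp : pvDpA nums = nums.foldl (fun dp x => nums.foldl (fun dp y =>
      (if dp.get? (PySem.Int.band x y) = none then dp.insert (PySem.Int.band x y) 0 else dp).insert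
        (PySem.Int.band x y)
        ((if dp.get? (PySem.Int.band x y) = none then dp.insert (PySem.Int.band x y) 0
          else dp).getD (PySem.Int.band x y) 0 + 1)) dp) PySem.Dict.empty := by
    unfold pvDpA
    exact pvNestedRange nums (fun (dp : PySem.Dict Int Int) x y =>
      (if dp.get? (PySem.Int.band x y) = none then dp.insert (PySem.Int.band x y) 0 else dp).insert
        (PySem.Int.band x y)
        ((if dp.get? (PySem.Int.band x y) = none then dp.insert (PySem.Int.band x y) 0
          else dp).getD (PySem.Int.band x y) 0 + 1)) PySem.Dict.empty
  rw [hdp]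
  simp only [pvStepEq]
  have h1 : ∀ (x : Int) (d : PySem.Dict Int Int),
      nums.foldl (fun dp y =>
        dp.insert (PySem.Int.band x y) (dp.getD (PySem.Int.band x y) 0 + 1)) d
      = (nums.map (fun y => PySem.Int.band x y)).foldl
          (fun dp k => dp.insert k (dp.getD k 0 + 1)) d := by
    intro x d; rw [List.foldl_map]
  simp only [h1, ← List.foldl_flatMap]
  exact PySem.Dict.foldl_insert_getD_add_one_eq_counter _

theorem pvA_eq (nums : List Int) : countTriplets nums = pvV nums := by
  have hmain : countTriplets nums = nums.foldl (fun ans x =>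
      (pvDpA nums).keys.foldl (fun ans j =>
        if PySem.Int.band x j = 0 then ans + (pvDpA nums).getD j 0 else ans) ans) 0 :=
    PySem.List.foldl_pyRange_zero_pyGetD nums 0 (fun ans x =>
      (pvDpA nums).keys.foldl (fun ans j =>
        if PySem.Int.band x j = 0 then ans + (pvDpA nums).getD j 0 else ans) ans) 0
  rw [hmain]
  simp only [pvDpA_eq, PySem.Dict.keys_counter, PySem.Dict.getD_counter]
  have hin : ∀ (x ans : Int),
      (PySem.Set.ofList (pvPairs nums)).foldl (fun ans j =>
        if PySem.Int.band x j = 0 then ans + ((pvPairs nums).count j : Int) else ans) ans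
      = ans + ((PySem.Set.ofList (pvPairs nums)).map (fun j =>
          if PySem.Int.band x j = 0 then ((pvPairs nums).count j : Int) else 0)).sum :=
    fun x ans => pvFoldlIteAdd _ _ _ ans
  simp only [hin]
  simp only [PySem.List.foldl_add, zero_add]
  unfold pvV
  congr 1
  apply List.map_congr_left
  intro x _
  rw [← List.sum_toFinset _ (PySem.Set.nodup_ofList (pvPairs nums))]
  rw [Finset.sum_list_map_count (pvPairs nums) (fun k => if PySem.Int.band x k = 0 then (1:Int) else 0)]
  have hfin : (PySem.Set.ofList (pvPairs nums)).toFinset = (pvPairs nums).toFinset := by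
    ext k; simp [PySem.Set.mem_ofList]
  rw [hfin]
  apply Finset.sum_congr rfl
  intro k _
  split <;> simp

-- ----- B side -----

theorem pvSumCongr {α : Type} (l : List α) {f g : α → Int} (h : ∀ a ∈ l, f a = g a) :
    (l.map f).sum = (l.map g).sum := by rw [List.map_congr_left h]

-- sums over flatMap split into nested sums
theorem pvSumFlatMap {α β : Type} (l : List α) (f : α → List β) (h : β → Int) :
    ((l.flatMap f).map h).sum = (l.map (fun a => ((f a).map h).sum)).sum := by
  induction l with
  | nil => simp
  | cons a l ih => simp [ih]

-- a double list sum commutes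
theorem pvSumSwap {α β : Type} (l : List α) (m : List β) (f : α → β → Int) :
    (l.map (fun x => (m.map (fun y => f x y)).sum)).sum
    = (m.map (fun y => (l.map (fun x => f x y)).sum)).sum := by
  induction l with
  | nil => simp
  | cons a l ih =>
    simp only [List.map_cons, List.sum_cons, ih]
    rw [← List.sum_map_add]

-- the memo invariant: every entry of the zeros dict is the true annihilator count
def pvGood (nums : List Int) (d : PySem.Dict Int Int) : Prop :=
  ∀ k v, d.get? k = some v → v = pvZcount nums k

-- a fold whose step adds f a to the accumulator and preserves the invariant
theorem pvFoldGood {α : Type} (G : PySem.Dict Int Int → Prop)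
    (step : (PySem.Dict Int Int × Int) → α → (PySem.Dict Int Int × Int))
    (f : α → Int)
    (h : ∀ d ans a, G d → (step (d, ans) a).2 = ans + f a ∧ G (step (d, ans) a).1) :
    ∀ (l : List α) (d : PySem.Dict Int Int) (ans : Int), G d →
      (l.foldl step (d, ans)).2 = ans + (l.map f).sum ∧ G (l.foldl step (d, ans)).1 := by
  intro l
  induction l with
  | nil => intro d ans hG; simpa using hG
  | cons a l ih =>
    intro d ans hG
    obtain ⟨h2, h1⟩ := h d ans a hG
    have heta : step (d, ans) a = ((step (d, ans) a).1, (step (d, ans) a).2) := rfl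
    simp only [List.foldl_cons]
    rw [heta, h2]
    obtain ⟨ih2, ih1⟩ := ih (step (d, ans) a).1 (ans + f a) h1
    constructor
    · rw [ih2]; simp [add_assoc]
    · exact ih1

-- B's inner step adds the annihilator count of the pair-AND mask and keeps the memo correct
theorem pvInnerStep (nums : List Int) (x : Int) (d : PySem.Dict Int Int) (ans y : Int)
    (hG : pvGood nums d) :
    ((fun (st : PySem.Dict Int Int × Int) y =>
      let m := PySem.Int.band x y
      let zeros := if st.1.get? m = none then st.1.insert m (pvZcount nums m) else st.1
      (zeros, st.2 + zeros.getD m 0)) (d, ans) y).2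
      = ans + pvZcount nums (PySem.Int.band x y)
    ∧ pvGood nums (((fun (st : PySem.Dict Int Int × Int) y =>
      let m := PySem.Int.band x y
      let zeros := if st.1.get? m = none then st.1.insert m (pvZcount nums m) else st.1
      (zeros, st.2 + zeros.getD m 0)) (d, ans) y).1) := by
  cases h0 : d.get? (PySem.Int.band x y) with
  | none =>
    constructor
    · simp [h0, PySem.Dict.getD_insert_self]
    · simp only [h0, if_true]
      intro k v hk
      rw [PySem.Dict.get?_insert] at hk
      split at hk
      · rename_i hkm; cases hk; rw [hkm]
      · exact hG k v hk
  | some w =>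
    constructor
    · simp [h0, PySem.Dict.getD_of_get?_eq_some d 0 h0, hG _ _ h0]
    · simpa [h0] using hG

theorem pvB_eq (nums : List Int) : countTriplets_alt nums = pvV nums := by
  have hB : countTriplets_alt nums
      = 0 + (nums.map (fun x => (nums.map (fun y =>
          pvZcount nums (PySem.Int.band x y))).sum)).sum := by
    unfold countTriplets_alt
    have houter : ∀ (d : PySem.Dict Int Int) (ans x : Int), pvGood nums d →
        ((fun (st : PySem.Dict Int Int × Int) x =>
          nums.foldl (fun st y =>
            let m := PySem.Int.band x y
            let zeros := if st.1.get? m = none then st.1.insert m (pvZcount nums m) else st.1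
            (zeros, st.2 + zeros.getD m 0)) st) (d, ans) x).2
          = ans + (nums.map (fun y => pvZcount nums (PySem.Int.band x y))).sum
        ∧ pvGood nums (((fun (st : PySem.Dict Int Int × Int) x =>
          nums.foldl (fun st y =>
            let m := PySem.Int.band x y
            let zeros := if st.1.get? m = none then st.1.insert m (pvZcount nums m) else st.1
            (zeros, st.2 + zeros.getD m 0)) st) (d, ans) x).1) := by
      intro d ans x hG
      exact pvFoldGood (pvGood nums) _ (fun y => pvZcount nums (PySem.Int.band x y))
        (fun d ans y hG => pvInnerStep nums x d ans y hG) nums d ans hG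
    have hempty : pvGood nums PySem.Dict.empty := by
      intro k v hk; simp [PySem.Dict.get?_empty] at hk
    exact (pvFoldGood (pvGood nums) _
      (fun x => (nums.map (fun y => pvZcount nums (PySem.Int.band x y))).sum)
      (fun d ans x hG => houter d ans x hG) nums PySem.Dict.empty 0 hempty).1
  rw [hB, zero_add]
  have hz : ∀ m : Int, pvZcount nums m
      = (nums.map (fun z => if PySem.Int.band z m = 0 then (1 : Int) else 0)).sum := by
    intro m
    unfold pvZcount
    rw [pvFoldlIteAdd nums (fun z => PySem.Int.band z m = 0) (fun _ => 1) 0, zero_add]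
  -- both sides are triple sums over nums³ of the indicator of (·&·)&· = 0, in permuted order
  have hVform : pvV nums = (nums.map (fun x => (nums.map (fun a => (nums.map (fun b =>
      if PySem.Int.band (PySem.Int.band a b) x = 0 then (1 : Int) else 0)).sum)).sum)).sum := by
    unfold pvV pvPairs
    apply pvSumCongr
    intro x _
    rw [pvSumFlatMap]
    apply pvSumCongr
    intro a _
    rw [List.map_map]
    apply pvSumCongr
    intro b _
    simp [Function.comp, PySem.Int.band_comm x]
  rw [hVform]
  have hBform : (nums.map (fun x => (nums.map (fun y =>
      pvZcount nums (PySem.Int.band x y))).sum)).sum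
      = (nums.map (fun x => (nums.map (fun y => (nums.map (fun z =>
          if PySem.Int.band (PySem.Int.band x y) z = 0 then (1 : Int) else 0)).sum)).sum)).sum := by
    apply pvSumCongr
    intro x _
    apply pvSumCongr
    intro y _
    rw [hz]
    apply pvSumCongr
    intro z _
    simp [PySem.Int.band_comm z]
  rw [hBform]
  -- cyclically permute the summation variables: Σx Σy Σz f x y z = Σa Σb Σx f a b x
  have hswap1 : ∀ (F : Int → Int → Int),
      (nums.map (fun x => (nums.map (fun a => F a x)).sum)).sum
      = (nums.map (fun a => (nums.map (fun x => F a x)).sum)).sum :=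
    fun F => pvSumSwap nums nums (fun x a => F a x)
  rw [hswap1 (fun a x => (nums.map (fun b =>
    if PySem.Int.band (PySem.Int.band a b) x = 0 then (1 : Int) else 0)).sum)]
  apply pvSumCongr
  intro a _
  exact (pvSumSwap nums nums (fun x b =>
    if PySem.Int.band (PySem.Int.band a b) x = 0 then (1 : Int) else 0)).symm

-- ===== VERDICT (by name: the statement is the Claim_ definition above) =====
theorem countTriplets_spec : Claim_equal_countTriplets := by
  intro nums _
  show countTriplets nums = countTriplets_alt nums
  rw [pvA_eq, pvB_eq]
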